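-- pv_equiv track=rewrite | github.com/pypi-data/pypi-mirror-38 | packages/sundarkid-foreman/sundarkid_foreman-0.1.1.dev0-py3-none-any.whl/foreman/foreman.py | order_hierarchy_numbered
-- ===== SOURCE A (Python) =====
-- def order_hierarchy_numbered(diffs):
--     '''
--     Order the hierarchy for creating hgs
--     will create a numbered map with elements in higher hierarchy with lower numbered keys
--     :param diffs: list(['a/b/c', 'a/d', 'a/b/d'])
--     :return: dict({'2':'a/b, '3':['a/b/c', 'a/b/d']})
--     '''
--     mappy = {}
--     for d in diffs:
--         if len(d.split("/")) in mappy.keys():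
--             mappy[len(d.split("/"))].append(d)
--         else:
--             mappy[len(d.split("/"))] = []
--             mappy[len(d.split("/"))].append(d)
--     return mappy
-- ===== SOURCE B (Python) =====
-- def order_hierarchy_numbered(diffs):
--     keys = [len(d.split("/")) for d in diffs]
--     return {k: [d for d, kk in zip(diffs, keys) if kk == k]
--             for k in dict.fromkeys(keys)}
-- ===== Notes on version B (the rewrite author's own statement) =====
-- stated objective: simpler
-- what changed: replaces the incremental dict-accumulation loop (membership test, create-bucket, append) by a two-phase comprehension: compute the segment-count key list once, then build each bucket for the distinct keys (in first-occurrence order) by filtering the input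
import Mathlib
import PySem

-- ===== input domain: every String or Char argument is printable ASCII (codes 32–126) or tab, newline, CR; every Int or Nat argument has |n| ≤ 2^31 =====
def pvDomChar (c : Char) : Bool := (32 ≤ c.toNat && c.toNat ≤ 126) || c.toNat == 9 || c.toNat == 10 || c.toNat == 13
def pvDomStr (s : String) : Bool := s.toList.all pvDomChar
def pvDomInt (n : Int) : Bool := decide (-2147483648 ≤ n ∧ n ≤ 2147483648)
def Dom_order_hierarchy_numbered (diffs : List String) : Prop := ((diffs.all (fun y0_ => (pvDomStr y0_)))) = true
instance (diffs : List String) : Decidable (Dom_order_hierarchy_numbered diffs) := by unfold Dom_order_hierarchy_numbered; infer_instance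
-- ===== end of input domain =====

-- B replaces A's incremental dict-accumulation loop by a two-phase build: the key list once,
-- then one filtered bucket per distinct key (objective: simpler; equivalence is about the return value).

-- len(d.split("/")): "/" is a nonempty separator, so split? always returns some
def pvSegCount (d : String) : Int := (((PySem.Str.split? d "/").getD []).length : Int)

-- ===== PORT A =====
def order_hierarchy_numbered (diffs : List String) : List (Int × List String) :=
  (diffs.foldl (fun mappy d =>
      if mappy.contains (pvSegCount d) then
        mappy.modify (pvSegCount d) [] (fun l => l ++ [d])
      else
        (mappy.insert (pvSegCount d) []).modify (pvSegCount d) [] (fun l => l ++ [d]))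
    PySem.Dict.empty).items

-- ===== PORT B =====
def order_hierarchy_numbered_alt (diffs : List String) : List (Int × List String) :=
  let keys := diffs.map pvSegCount
  (PySem.List.dedup keys).map (fun k =>
    (k, ((diffs.zip keys).filter (fun p => p.2 == k)).map (fun p => p.1)))

-- ===== PRECONDITION & SPEC =====
def Spec_order_hierarchy_numbered (diffs : List String) (out : List (Int × List String)) : Prop := out = order_hierarchy_numbered_alt diffs
instance (diffs : List String) (out : List (Int × List String)) : Decidable (Spec_order_hierarchy_numbered diffs out) := by unfold Spec_order_hierarchy_numbered; infer_instance

-- ===== CLAIM (what is proved, stated in full; the proofs are below) =====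
def Claim_equal_order_hierarchy_numbered : Prop := ∀ (diffs : List String), Dom_order_hierarchy_numbered diffs → Spec_order_hierarchy_numbered diffs (order_hierarchy_numbered diffs)

-- ===== LEMMAS AND PROOFS =====

-- A's loop body equals a single Dict.modify at the key
theorem pv_step_eq (m : PySem.Dict Int (List String)) (d : String) :
    (if m.contains (pvSegCount d) then
        m.modify (pvSegCount d) [] (fun l => l ++ [d])
      else
        (m.insert (pvSegCount d) []).modify (pvSegCount d) [] (fun l => l ++ [d]))
    = m.modify (pvSegCount d) [] (fun l => l ++ [d]) := by
  by_cases h : m.contains (pvSegCount d)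
  · simp [h]
  · rw [Bool.not_eq_true] at h
    simp [h, PySem.Dict.modify, PySem.Dict.getD_insert_self,
      PySem.Dict.insert_insert_self, PySem.Dict.getD_of_not_contains _ _ h]

theorem pv_fold_eq (diffs : List String) :
    (diffs.foldl (fun mappy d =>
      if mappy.contains (pvSegCount d) then
        mappy.modify (pvSegCount d) [] (fun l => l ++ [d])
      else
        (mappy.insert (pvSegCount d) []).modify (pvSegCount d) [] (fun l => l ++ [d]))
      PySem.Dict.empty)
    = diffs.foldl (fun mappy d => mappy.modify (pvSegCount d) [] (fun l => l ++ [d]))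
        PySem.Dict.empty := by
  congr 1
  funext m d
  exact pv_step_eq m d

theorem pv_getD_eq (diffs : List String) (k : Int) :
    (diffs.foldl (fun mappy d => mappy.modify (pvSegCount d) [] (fun l => l ++ [d]))
        PySem.Dict.empty).getD k []
    = ((diffs.zip (diffs.map pvSegCount)).filter (fun p => p.2 == k)).map (fun p => p.1) := by
  have h := PySem.Dict.getD_foldl_modify_append
    (diffs.map (fun d => (pvSegCount d, d))) (PySem.Dict.empty) k
  rw [List.foldl_map] at h
  simp only [PySem.Dict.getD_empty, List.nil_append] at h
  rw [h]
  have hz : diffs.zip (diffs.map pvSegCount) = diffs.map (fun d => (d, pvSegCount d)) := by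
    have := @List.zip_map' String String Int id pvSegCount diffs
    simpa using this
  rw [hz, List.filter_map, List.filter_map, List.map_map, List.map_map]
  rfl

-- ===== VERDICT (by name: the statement is the Claim_ definition above) =====
theorem order_hierarchy_numbered_spec : Claim_equal_order_hierarchy_numbered := by
  intro diffs _
  unfold Spec_order_hierarchy_numbered order_hierarchy_numbered order_hierarchy_numbered_alt
  rw [pv_fold_eq]
  set m := diffs.foldl (fun mappy d => mappy.modify (pvSegCount d) [] (fun l => l ++ [d]))
      PySem.Dict.empty with hm
  have hnd : m.keys.Nodup := by
    rw [hm]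
    exact PySem.Dict.nodup_keys_foldl_modify_key diffs pvSegCount []
      (fun _ d v => v ++ [d]) PySem.Dict.empty (by simp [PySem.Dict.keys, PySem.Dict.empty])
  have hkeys : m.keys = PySem.List.dedup (diffs.map pvSegCount) := by
    rw [hm]
    rw [PySem.Dict.keys_foldl_modify_key diffs pvSegCount []
      (fun _ d v => v ++ [d]) PySem.Dict.empty]
    rw [PySem.List.dedup_eq_ofList]
    rfl
  rw [PySem.Dict.items_eq_map_keys m hnd [], hkeys]
  exact List.map_congr_left (fun k _ => by rw [pv_getD_eq diffs k])
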